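-- pv_equiv track=rewrite | github.com/vojtechBobcik/adventCoding-containers | main.py | findSpecialChars
-- ===== SOURCE A (Python) =====
-- def findSpecialChars(input):
--     specialChars= set()
--     noSpecialChar={".","\r","\n"}
--
--     for y in input:
--         for x in y:
--             if x in noSpecialChar:pass
--             elif x.isdigit():pass
--             else: specialChars.add(x)
--
--     return specialChars
-- ===== SOURCE B (Python) =====
-- def findSpecialChars(input):
--     bad = set("0123456789.\r\n")
--
--     def go(strings):
--         if not strings:
--             return set()
--         if len(strings) == 1:
--             return set(strings[0]) - bad
--         mid = len(strings) // 2
--         return go(strings[:mid]) | go(strings[mid:])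
--
--     return go(list(input))
-- ===== Notes on version B (the rewrite author's own statement) =====
-- stated objective: alternative
-- what changed: B is a divide-and-conquer recursion: it splits the list of strings in halves, turns each single string into a character set minus one fixed literal set('0123456789.\r\n') (no per-character isdigit/membership tests), and merges the halves with set union, instead of A's nested iterative loops with a three-way branch per character.
import Mathlib
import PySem

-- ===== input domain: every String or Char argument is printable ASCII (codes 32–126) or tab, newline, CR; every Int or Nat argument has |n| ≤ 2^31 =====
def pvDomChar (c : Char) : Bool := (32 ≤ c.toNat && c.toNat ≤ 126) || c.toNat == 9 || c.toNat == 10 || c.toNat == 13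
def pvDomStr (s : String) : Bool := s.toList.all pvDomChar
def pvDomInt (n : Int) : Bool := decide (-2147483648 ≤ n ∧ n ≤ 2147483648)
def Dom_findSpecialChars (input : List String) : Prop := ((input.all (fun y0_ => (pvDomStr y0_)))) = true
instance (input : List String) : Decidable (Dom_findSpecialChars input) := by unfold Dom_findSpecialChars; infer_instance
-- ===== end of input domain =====

-- B replaces A's nested loops with a per-character branch by a divide-and-conquer recursion:
-- each string becomes a character set minus one fixed literal set('0123456789.\r\n'),
-- and halves are merged with set union (objective: alternative decomposition, same cost).

-- ===== PORT A =====
def findSpecialChars (input : List String) : List String :=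
  let noSpecialChar : PySem.Set String := PySem.Set.ofList [".", "\r", "\n"]
  input.foldl (fun specialChars y =>
    y.toList.foldl (fun specialChars c =>
      let x := String.ofList [c]
      if PySem.Set.contains noSpecialChar x then specialChars
      else if PySem.Str.strIsdigit x then specialChars
      else PySem.Set.add specialChars x) specialChars) PySem.Set.empty

-- ===== PORT B =====
-- bad = set("0123456789.\r\n")
def pvBad : PySem.Set String :=
  PySem.Set.ofList ("0123456789.\r\n".toList.map (fun c => String.ofList [c]))

-- the inner recursive helper 'go' of Source B
def pvGo (strings : List String) : PySem.Set String :=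
  match strings with
  | [] => PySem.Set.empty
  | [y] => PySem.Set.diff (PySem.Set.ofList (y.toList.map (fun c => String.ofList [c]))) pvBad
  | y :: z :: rest =>
      let l := y :: z :: rest
      let mid := l.length / 2
      PySem.Set.union (pvGo (l.take mid)) (pvGo (l.drop mid))
termination_by strings.length
decreasing_by
  · simp [List.length_take]; omega
  · simp [List.length_drop]; omega

def findSpecialChars_alt (input : List String) : List String := pvGo input

-- ===== PRECONDITION & SPEC =====
def Spec_findSpecialChars (input : List String) (out : List String) : Prop := out = findSpecialChars_alt input
instance (input : List String) (out : List String) : Decidable (Spec_findSpecialChars input out) := by unfold Spec_findSpecialChars; infer_instance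

-- ===== CLAIM (what is proved, stated in full; the proofs are below) =====
def Claim_equal_findSpecialChars : Prop := ∀ (input : List String), Dom_findSpecialChars input → Spec_findSpecialChars input (findSpecialChars input)

-- ===== LEMMAS AND PROOFS =====

-- the per-character predicate of A
def pvKeep (x : String) : Bool :=
  !PySem.Set.contains (PySem.Set.ofList [".", "\r", "\n"]) x && !PySem.Str.strIsdigit x

-- A's guarded add and its fold
def pvGadd (s : PySem.Set String) (x : String) : PySem.Set String :=
  if pvKeep x then PySem.Set.add s x else s

def pvG (l : List String) : PySem.Set String := l.foldl pvGadd PySem.Set.empty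

def pvSing (y : String) : List String := y.toList.map (fun c => String.ofList [c])

def pvFlatten (input : List String) : List String := input.flatMap pvSing

-- folding over a flatMap = nested folding
theorem pv_foldl_flatMap {α β σ : Type} (g : σ → β → σ) (f : α → List β) :
    ∀ (l : List α) (b : σ),
      (l.flatMap f).foldl g b = l.foldl (fun b a => (f a).foldl g b) b := by
  intro l
  induction l with
  | nil => intro b; rfl
  | cons a l ih => intro b; simp [List.flatMap_cons, List.foldl_append, ih]

-- A's nested loop, read over the flattened singleton-character-string list with a guarded add
theorem pv_A_eq :
    ∀ (input : List String), findSpecialChars input = pvG (pvFlatten input) := by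
  intro input
  unfold pvG pvFlatten
  rw [pv_foldl_flatMap]
  show input.foldl (fun specialChars y =>
      y.toList.foldl (fun specialChars c =>
        let x := String.ofList [c]
        if PySem.Set.contains (PySem.Set.ofList [".", "\r", "\n"]) x then specialChars
        else if PySem.Str.strIsdigit x then specialChars
        else PySem.Set.add specialChars x) specialChars) PySem.Set.empty = _
  apply PySem.List.foldl_congr_mem
  intro acc y _
  unfold pvSing
  rw [List.foldl_map]
  apply PySem.List.foldl_congr_mem
  intro acc' c _
  by_cases h1 : PySem.Set.contains (PySem.Set.ofList [".", "\r", "\n"]) (String.ofList [c]) = true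
  · have hg : pvKeep (String.ofList [c]) = false := by unfold pvKeep; rw [h1]; rfl
    rw [if_pos h1]; unfold pvGadd; rw [hg]; simp
  · by_cases h2 : PySem.Str.strIsdigit (String.ofList [c]) = true
    · have hg : pvKeep (String.ofList [c]) = false := by
        unfold pvKeep; rw [h2]; exact Bool.and_false _
      rw [if_neg h1, if_pos h2]; unfold pvGadd; rw [hg]; simp
    · have hg : pvKeep (String.ofList [c]) = true := by
        unfold pvKeep
        rw [Bool.eq_false_iff.mpr h1, Bool.eq_false_iff.mpr h2]
        rfl
      rw [if_neg h1, if_neg h2]; unfold pvGadd; rw [hg]; simp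

-- for singleton strings, "not in bad" is exactly A's keep predicate
theorem pv_keep_singleton (c : Char) :
    (!pvBad.contains (String.ofList [c])) = pvKeep (String.ofList [c]) := by
  have hbad : pvBad = ["0","1","2","3","4","5","6","7","8","9",".","\r","\n"] := by decide
  have hno : PySem.Set.ofList [".", "\r", "\n"] = [".", "\r", "\n"] := by decide
  unfold pvKeep
  rw [hbad, hno]
  simp only [PySem.Set.contains_eq_listContains, List.contains_eq_mem, List.mem_cons,
    List.not_mem_nil, or_false, PySem.Str.strIsdigit, PySem.Chars.strIsdigit]
  have htl : (String.ofList [c]).toList = [c] := by simp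
  rw [htl]
  have hone : ((!([c].isEmpty)) && [c].all PySem.Chars.isdigit) = PySem.Chars.isdigit c := by simp
  rw [hone]
  have hinj : ∀ d : Char, (String.ofList [c] = String.ofList [d]) ↔ c = d := by
    intro d
    constructor
    · intro h; have := congrArg String.toList h; simpa using this
    · intro h; rw [h]
  simp only [show ("0" : String) = String.ofList ['0'] from rfl,
    show ("1" : String) = String.ofList ['1'] from rfl,
    show ("2" : String) = String.ofList ['2'] from rfl,
    show ("3" : String) = String.ofList ['3'] from rfl,
    show ("4" : String) = String.ofList ['4'] from rfl,
    show ("5" : String) = String.ofList ['5'] from rfl,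
    show ("6" : String) = String.ofList ['6'] from rfl,
    show ("7" : String) = String.ofList ['7'] from rfl,
    show ("8" : String) = String.ofList ['8'] from rfl,
    show ("9" : String) = String.ofList ['9'] from rfl,
    show ("." : String) = String.ofList ['.'] from rfl,
    show ("\r" : String) = String.ofList ['\r'] from rfl,
    show ("\n" : String) = String.ofList ['\n'] from rfl, hinj]
  by_cases h0 : '0' ≤ c ∧ c ≤ '9'
  · have hdig : c = '0' ∨ c = '1' ∨ c = '2' ∨ c = '3' ∨ c = '4' ∨ c = '5' ∨ c = '6' ∨ c = '7' ∨ c = '8' ∨ c = '9' := by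
      obtain ⟨h1, h2⟩ := h0
      have h1' : 48 ≤ c.toNat := h1
      have h2' : c.toNat ≤ 57 := h2
      have hval : ∀ (d : Char), c.toNat = d.toNat → c = d := fun d h => Char.ext (UInt32.toNat_inj.mp h)
      have hn : c.toNat = 48 ∨ c.toNat = 49 ∨ c.toNat = 50 ∨ c.toNat = 51 ∨ c.toNat = 52 ∨
          c.toNat = 53 ∨ c.toNat = 54 ∨ c.toNat = 55 ∨ c.toNat = 56 ∨ c.toNat = 57 := by omega
      rcases hn with h | h | h | h | h | h | h | h | h | h
      · exact Or.inl (hval '0' h)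
      · exact Or.inr (Or.inl (hval '1' h))
      · exact Or.inr (Or.inr (Or.inl (hval '2' h)))
      · exact Or.inr (Or.inr (Or.inr (Or.inl (hval '3' h))))
      · exact Or.inr (Or.inr (Or.inr (Or.inr (Or.inl (hval '4' h)))))
      · exact Or.inr (Or.inr (Or.inr (Or.inr (Or.inr (Or.inl (hval '5' h))))))
      · exact Or.inr (Or.inr (Or.inr (Or.inr (Or.inr (Or.inr (Or.inl (hval '6' h)))))))
      · exact Or.inr (Or.inr (Or.inr (Or.inr (Or.inr (Or.inr (Or.inr (Or.inl (hval '7' h))))))))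
      · exact Or.inr (Or.inr (Or.inr (Or.inr (Or.inr (Or.inr (Or.inr (Or.inr (Or.inl (hval '8' h)))))))))
      · exact Or.inr (Or.inr (Or.inr (Or.inr (Or.inr (Or.inr (Or.inr (Or.inr (Or.inr (hval '9' h)))))))))
    rcases hdig with h | h | h | h | h | h | h | h | h | h <;> subst h <;> decide
  · have hd : PySem.Chars.isdigit c = false := by
      unfold PySem.Chars.isdigit
      rcases not_and_or.mp h0 with h | h <;> simp [h]
    have hnum : ∀ d ∈ (['0','1','2','3','4','5','6','7','8','9'] : List Char), ¬ (c = d) := by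
      intro d hd' he
      apply h0
      subst he
      fin_cases hd' <;> exact ⟨by decide, by decide⟩
    simp [hd, hnum '0' (by simp), hnum '1' (by simp), hnum '2' (by simp), hnum '3' (by simp),
      hnum '4' (by simp), hnum '5' (by simp), hnum '6' (by simp), hnum '7' (by simp),
      hnum '8' (by simp), hnum '9' (by simp)]

-- membership in a foldl of adds
theorem pv_mem_foldl_add (x : String) :
    ∀ (t : List String) (s : PySem.Set String),
      (x ∈ s ∨ x ∈ t) → x ∈ t.foldl PySem.Set.add s := by
  intro t
  induction t with
  | nil => intro s h; simpa using h
  | cons y t ih =>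
      intro s h
      simp only [List.foldl_cons]
      apply ih
      rcases h with h | h
      · exact Or.inl ((PySem.Set.mem_add s y x).mpr (Or.inl h))
      · rcases List.mem_cons.mp h with h | h
        · exact Or.inl ((PySem.Set.mem_add s y x).mpr (Or.inr h))
        · exact Or.inr h

-- pushing one guarded add through a foldl of adds
theorem pv_add_gadd (s t : PySem.Set String) (x : String) :
    List.foldl PySem.Set.add s (pvGadd t x) = pvGadd (List.foldl PySem.Set.add s t) x := by
  unfold pvGadd
  by_cases hk : pvKeep x = true
  · rw [if_pos hk, if_pos hk]
    by_cases hc : t.contains x = true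
    · have hmem : x ∈ t := (PySem.Set.contains_iff t x).mp hc
      have had : PySem.Set.add t x = t := by simp [PySem.Set.add, hmem]
      have hmem2 : x ∈ List.foldl PySem.Set.add s t := pv_mem_foldl_add x t s (Or.inr hmem)
      have had2 : PySem.Set.add (List.foldl PySem.Set.add s t) x = List.foldl PySem.Set.add s t := by
        simp [PySem.Set.add, hmem2]
      rw [had, had2]
    · have hmem : x ∉ t := fun h => hc ((PySem.Set.contains_iff t x).mpr h)
      have had : PySem.Set.add t x = t ++ [x] := by simp [PySem.Set.add, hmem]
      rw [had, List.foldl_append]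
      rfl
  · rw [if_neg hk, if_neg hk]

-- adding the elements of a guarded-fold result = guard-folding the raw list
theorem pv_union_G :
    ∀ (b : List String) (t s : PySem.Set String),
      List.foldl PySem.Set.add s (List.foldl pvGadd t b)
        = List.foldl pvGadd (List.foldl PySem.Set.add s t) b := by
  intro b
  induction b with
  | nil => intro t s; rfl
  | cons x b ih =>
      intro t s
      simp only [List.foldl_cons]
      rw [ih (pvGadd t x) s, pv_add_gadd]

-- filtering commutes with one Set.add
theorem pv_filter_add (p : String → Bool) (s : PySem.Set String) (x : String) :
    (PySem.Set.add s x).filter p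
      = if p x then PySem.Set.add (s.filter p) x else s.filter p := by
  by_cases hp : p x = true
  · by_cases hx : x ∈ s
    · have hx' : x ∈ s.filter p := List.mem_filter.mpr ⟨hx, hp⟩
      simp [PySem.Set.add, hx, hx', hp]
    · have hx' : x ∉ s.filter p := fun h => hx (List.mem_filter.mp h).1
      simp [PySem.Set.add, hx, hx', hp, List.filter_append]
  · have hp' : p x = false := Bool.not_eq_true _ ▸ (by simpa using hp)
    by_cases hx : x ∈ s
    · simp [PySem.Set.add, hx, hp']
    · simp [PySem.Set.add, hx, hp', List.filter_append]

-- filtering a set built by repeated add = building it with a guarded add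
theorem pv_filter_foldl_add (p : String → Bool) :
    ∀ (L : List String) (s : PySem.Set String),
      (L.foldl PySem.Set.add s).filter p
        = L.foldl (fun s x => if p x then PySem.Set.add s x else s) (s.filter p) := by
  intro L
  induction L with
  | nil => intro s; rfl
  | cons x L ih =>
      intro s
      simp only [List.foldl_cons, ih, pv_filter_add]

-- the single-string base case of B equals the guarded fold of A over that string
theorem pv_base_eq (y : String) :
    PySem.Set.diff (PySem.Set.ofList (pvSing y)) pvBad = pvG (pvSing y) := by
  unfold PySem.Set.diff PySem.Set.ofList pvG
  rw [pv_filter_foldl_add]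
  show (pvSing y).foldl _ (List.filter _ []) = _
  simp only [List.filter_nil]
  apply PySem.List.foldl_congr_mem
  intro acc x hx
  unfold pvSing at hx
  obtain ⟨c, _, rfl⟩ := List.mem_map.mp hx
  rw [pv_keep_singleton c]
  rfl

-- B's divide-and-conquer recursion computes A's guarded fold over the flattened input
theorem pv_go_eq : ∀ (l : List String), pvGo l = pvG (pvFlatten l) := by
  intro l
  induction l using pvGo.induct with
  | case1 => rw [pvGo]; rfl
  | case2 y =>
      rw [pvGo]
      show PySem.Set.diff (PySem.Set.ofList (pvSing y)) pvBad = _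
      rw [pv_base_eq]
      unfold pvFlatten
      simp [pvSing]
  | case3 y z rest l mid ih1 ih2 =>
      rw [pvGo]
      show PySem.Set.union (pvGo (List.take mid l)) (pvGo (List.drop mid l)) = _
      rw [ih1, ih2]
      unfold PySem.Set.union PySem.Set.update
      show List.foldl PySem.Set.add (pvG (pvFlatten (List.take mid l)))
          (pvG (pvFlatten (List.drop mid l))) = _
      unfold pvG
      rw [pv_union_G]
      show List.foldl pvGadd
          (List.foldl pvGadd PySem.Set.empty (pvFlatten (List.take mid l)))
          (pvFlatten (List.drop mid l)) = _
      rw [← List.foldl_append]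
      have h2 : pvFlatten (List.take mid l) ++ pvFlatten (List.drop mid l)
          = pvFlatten (y :: z :: rest) := by
        unfold pvFlatten
        rw [← List.flatMap_append, List.take_append_drop]
      rw [h2]

-- ===== VERDICT (by name: the statement is the Claim_ definition above) =====
theorem findSpecialChars_spec : Claim_equal_findSpecialChars := by
  intro input _
  unfold Spec_findSpecialChars findSpecialChars_alt
  rw [pv_A_eq, pv_go_eq]
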